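-- pv_equiv track=rewrite | github.com/CasuallyPassingBy/Proyecto_2_IA | a_star_unidirectional.py | generate_unidirectional_weights
-- ===== SOURCE A (Python) =====
-- def generate_unidirectional_weights(tree):
--     unidirectional_tree = tree[0].copy()
--     unidirectional_weights = []
--
--     # iterate through the tuples to obtain the reversed connections
--     for node_tuple in tree[0]:
--         reversed_tuple = (node_tuple[1], node_tuple[0])
--         # add the reversed tuple to the unidirectional tree
--         unidirectional_tree.append(reversed_tuple)
--
--     # obtain the reversed weights
--     reversed_weights = {}
--     for weight in tree[1]:
--         for connection in weight[1]:
--             if connection[0] not in reversed_weights: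
--                 reversed_weights[connection[0]] = [(weight[0],connection[1])]
--             else:
--                 previous_reversed_weight_value = reversed_weights[connection[0]]
--                 previous_reversed_weight_value.append((weight[0],connection[1]))
--                 reversed_weights[connection[0]] = previous_reversed_weight_value
--
--     # merge the weights lists
--     for weight in tree[1]:
--         # get the reversed weight and connections of the current node being iterated
--         current_reversed_weights = []
--         try:
--             current_reversed_weights = reversed_weights[weight[0]]
--         except:
--             current_reversed_weights = []
--
--         current_connections = weight[1].copy()
--         if len(current_reversed_weights) != 0:
--             for current_reversed_weight in current_reversed_weights:
--                 current_connections.append(current_reversed_weight)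
--
--         unidirectional_weights.append([weight[0], current_connections])
--
--     return unidirectional_tree, unidirectional_weights
-- ===== SOURCE B (Python) =====
-- def generate_unidirectional_weights(tree):
--     edges, weights = tree
--     # flatten all reversed weight entries once: (target, (source, cost))
--     rev = [(c0, (w0, c1)) for w0, conns in weights for c0, c1 in conns]
--     out = [[w0, list(conns) + [e for k, e in rev if k == w0]]
--            for w0, conns in weights]
--     return edges + [(b, a) for (a, b) in edges], out
-- ===== Notes on version B (the rewrite author's own statement) =====
-- stated objective: simpler
-- what changed: Replaced A's three passes (dict of reversed weights built key by key with not-in checks, then a try/except merge loop with manual appends) by one flat comprehension of reversed entries that is filtered per node inside a single output comprehension, with no dict at all.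
import Mathlib
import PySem

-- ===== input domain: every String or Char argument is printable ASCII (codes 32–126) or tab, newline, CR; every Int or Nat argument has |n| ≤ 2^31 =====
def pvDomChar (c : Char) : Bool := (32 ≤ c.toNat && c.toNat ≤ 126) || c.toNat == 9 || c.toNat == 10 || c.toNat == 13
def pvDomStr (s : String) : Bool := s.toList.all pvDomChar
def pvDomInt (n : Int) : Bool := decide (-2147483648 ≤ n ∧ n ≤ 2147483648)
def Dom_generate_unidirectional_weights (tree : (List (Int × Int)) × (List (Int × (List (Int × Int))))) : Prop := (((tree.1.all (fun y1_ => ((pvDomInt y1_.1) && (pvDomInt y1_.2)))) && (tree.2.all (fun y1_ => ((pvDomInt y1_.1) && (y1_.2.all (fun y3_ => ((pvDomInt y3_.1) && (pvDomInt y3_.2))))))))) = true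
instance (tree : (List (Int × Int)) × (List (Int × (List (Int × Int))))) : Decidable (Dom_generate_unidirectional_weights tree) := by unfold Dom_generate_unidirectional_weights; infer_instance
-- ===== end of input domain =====

-- B replaces A's dict-grouping of reversed edges plus a merge pass by one flat list of
-- reversed entries filtered per node inside a single comprehension (objective: simpler).

-- ===== PORT A =====
-- the inner dict-building step of A: `if connection[0] not in reversed_weights: … else: …`
-- (Python's `reversed_weights[connection[0]]` in the else branch is ported as getD; the
--  key is present there by the guard, so it is exact)
def pvStepA (d : PySem.Dict Int (List (Int × Int))) (p : Int × (Int × Int)) :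
    PySem.Dict Int (List (Int × Int)) :=
  if d.contains p.1 = false then d.insert p.1 [p.2]
  else d.insert p.1 (d.getD p.1 [] ++ [p.2])

def generate_unidirectional_weights (tree : (List (Int × Int)) × (List (Int × (List (Int × Int))))) : (List (Int × Int)) × (List (Int × (List (Int × Int)))) :=
  -- unidirectional_tree = tree[0].copy(); for node_tuple in tree[0]: append reversed
  let unidirectional_tree :=
    tree.1.foldl (fun acc node_tuple => acc ++ [(node_tuple.2, node_tuple.1)]) tree.1
  -- reversed_weights = {}; nested loop over tree[1] and weight[1]
  let reversed_weights :=
    tree.2.foldl (fun d weight =>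
      weight.2.foldl (fun d connection => pvStepA d (connection.1, (weight.1, connection.2))) d)
      PySem.Dict.empty
  -- merge loop (the try/except lookup is ported as getD with default [])
  let unidirectional_weights :=
    tree.2.foldl (fun out weight =>
      let current_reversed_weights := reversed_weights.getD weight.1 []
      let current_connections := weight.2
      let current_connections :=
        if current_reversed_weights.length ≠ 0 then
          current_reversed_weights.foldl (fun l e => l ++ [e]) current_connections
        else current_connections
      out ++ [(weight.1, current_connections)]) []
  (unidirectional_tree, unidirectional_weights)

-- ===== PORT B =====
def pvRev (weights : List (Int × (List (Int × Int)))) : List (Int × (Int × Int)) :=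
  weights.flatMap (fun w => w.2.map (fun c => (c.1, (w.1, c.2))))

def generate_unidirectional_weights_alt (tree : (List (Int × Int)) × (List (Int × (List (Int × Int))))) : (List (Int × Int)) × (List (Int × (List (Int × Int)))) :=
  let rev := pvRev tree.2
  let out := tree.2.map (fun w =>
    (w.1, w.2 ++ (rev.filter (fun p => p.1 == w.1)).map (fun p => p.2)))
  (tree.1 ++ tree.1.map (fun e => (e.2, e.1)), out)

-- ===== PRECONDITION & SPEC =====
def Spec_generate_unidirectional_weights (tree : (List (Int × Int)) × (List (Int × (List (Int × Int))))) (out : (List (Int × Int)) × (List (Int × (List (Int × Int))))) : Prop := out = generate_unidirectional_weights_alt tree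
instance (tree : (List (Int × Int)) × (List (Int × (List (Int × Int))))) (out : (List (Int × Int)) × (List (Int × (List (Int × Int))))) : Decidable (Spec_generate_unidirectional_weights tree out) := by unfold Spec_generate_unidirectional_weights; infer_instance

-- ===== CLAIM (what is proved, stated in full; the proofs are below) =====
def Claim_equal_generate_unidirectional_weights : Prop := ∀ (tree : (List (Int × Int)) × (List (Int × (List (Int × Int))))), Dom_generate_unidirectional_weights tree → Spec_generate_unidirectional_weights tree (generate_unidirectional_weights tree)

-- ===== LEMMAS AND PROOFS =====

-- an append-one-at-a-time loop is init ++ map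
theorem pv_foldl_append_map {α β : Type} (g : α → β) (l : List α) (init : List β) :
    l.foldl (fun acc a => acc ++ [g a]) init = init ++ l.map g := by
  induction l generalizing init with
  | nil => simp
  | cons a tl ih => simp [List.foldl_cons, ih, List.append_assoc]

-- an append-one-at-a-time loop with no transformation is ++
theorem pv_foldl_append_id {β : Type} (l : List β) (init : List β) :
    l.foldl (fun acc a => acc ++ [a]) init = init ++ l := by
  induction l generalizing init with
  | nil => simp
  | cons a tl ih => simp [List.foldl_cons, ih]

-- the nested dict-building loop equals the flat loop over pvRev
theorem pv_build_flat (weights : List (Int × (List (Int × Int))))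
    (d : PySem.Dict Int (List (Int × Int))) :
    weights.foldl (fun d w =>
        w.2.foldl (fun d c => pvStepA d (c.1, (w.1, c.2))) d) d
      = (pvRev weights).foldl pvStepA d := by
  induction weights generalizing d with
  | nil => simp [pvRev]
  | cons w tl ih =>
      simp only [List.foldl_cons, pvRev, List.flatMap_cons, List.foldl_append, ih,
        List.foldl_map]

-- one step of A's dict loop, seen through getD
theorem pv_stepA_getD (d : PySem.Dict Int (List (Int × Int))) (p : Int × (Int × Int)) (c : Int) :
    (pvStepA d p).getD c [] = if c = p.1 then d.getD c [] ++ [p.2] else d.getD c [] := by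
  unfold pvStepA
  by_cases hc : d.contains p.1 = false
  · rw [if_pos hc]
    rw [PySem.Dict.getD_insert]
    split_ifs with h
    · subst h; rw [PySem.Dict.getD_of_not_contains d [] hc]; rfl
    · rfl
  · rw [if_neg hc]
    rw [PySem.Dict.getD_insert]
    split_ifs with h
    · subst h; rfl
    · rfl

-- the flat dict loop groups exactly like a filter of the flat list
theorem pv_foldl_stepA_getD (l : List (Int × (Int × Int)))
    (d : PySem.Dict Int (List (Int × Int))) (c : Int) :
    (l.foldl pvStepA d).getD c []
      = d.getD c [] ++ (l.filter (fun p => p.1 == c)).map (fun p => p.2) := by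
  induction l generalizing d with
  | nil => simp
  | cons p tl ih =>
      simp only [List.foldl_cons, ih, pv_stepA_getD, List.filter_cons]
      by_cases h : c = p.1
      · simp [h, List.append_assoc]
      · have : (p.1 == c) = false := by simp [Ne.symm h]
        simp [h, this]

-- ===== VERDICT (by name: the statement is the Claim_ definition above) =====
theorem generate_unidirectional_weights_spec : Claim_equal_generate_unidirectional_weights := by
  intro tree _
  show _ = _
  unfold generate_unidirectional_weights generate_unidirectional_weights_alt
  refine Prod.ext ?_ ?_
  · simpa using pv_foldl_append_map (fun e => ((e : Int × Int).2, e.1)) tree.1 tree.1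
  · simp only [pv_build_flat]
    rw [pv_foldl_append_map
      (fun weight : Int × (List (Int × Int)) =>
        (weight.1,
          let crw := ((pvRev tree.2).foldl pvStepA PySem.Dict.empty).getD weight.1 []
          let cc := weight.2
          if crw.length ≠ 0 then crw.foldl (fun l e => l ++ [e]) cc else cc))
      tree.2 []]
    simp only [List.nil_append]
    apply List.map_congr_left
    intro w _
    refine Prod.ext rfl ?_
    simp only
    rw [pv_foldl_stepA_getD, PySem.Dict.getD_empty, List.nil_append]
    split_ifs with h
    · exact pv_foldl_append_id _ _
    · rw [List.length_eq_zero_iff.mp (not_ne_iff.mp h), List.append_nil]
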